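-- pv_equiv track=rewrite | github.com/rebuilder945/FL_research | ast_research/python_code_5.23/page6/success_code/宋明雨-4044-2023-11-02_21_45_56.py | sux
-- ===== SOURCE A (Python) =====
-- def sux(n):
--     List1 = []
--     if n<=100:
--         return "none"
--     elif n<1000:
--         List = [int(i) for i in range(100,n+1)]
--     elif n>=1000:
--         List = [int(i) for i in range(100,1000)]
--     for i in List:
--         A=str(i)
--         if int(A[0])**3 +int(A[1])**3+int(A[2])**3 == int(A):
--             List1.append(int(A))
--     if List1 == []:
--         return "none"
--     else:
--         return "\n".join(str(i) for i  in List1)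
-- ===== SOURCE B (Python) =====
-- # B: closed form over the four three-digit Armstrong numbers instead of scanning the whole range.
-- ARMSTRONG_3 = (153, 370, 371, 407)
--
-- def sux(n):
--     if n <= 100:
--         return "none"
--     result = [x for x in ARMSTRONG_3 if x <= n]
--     if not result:
--         return "none"
--     return "\n".join(str(x) for x in result)
-- ===== Notes on version B (the rewrite author's own statement) =====
-- stated objective: simpler
-- what changed: Replaces the per-number digit-cube scan of range(100, min(n+1,1000)) with a closed-form constant tuple of the four three-digit Armstrong numbers filtered by <= n.
import Mathlib
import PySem

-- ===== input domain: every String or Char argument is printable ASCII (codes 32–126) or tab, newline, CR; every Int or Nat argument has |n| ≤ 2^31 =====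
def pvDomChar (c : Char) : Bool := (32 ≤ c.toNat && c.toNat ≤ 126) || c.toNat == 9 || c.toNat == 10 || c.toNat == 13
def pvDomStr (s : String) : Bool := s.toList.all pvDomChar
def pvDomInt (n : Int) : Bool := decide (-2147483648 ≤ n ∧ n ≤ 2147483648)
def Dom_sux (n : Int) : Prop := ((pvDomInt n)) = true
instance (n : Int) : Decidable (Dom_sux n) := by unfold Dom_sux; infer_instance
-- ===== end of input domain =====

-- B replaces A's digit-cube scan of range(100, min(n+1, 1000)) with the closed-form list of
-- the four three-digit Armstrong numbers filtered by <= n (objective: simpler/closed form).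

-- ===== PORT A =====
-- the body of A's for-loop: A = str(i); digit-cube test; List1.append(int(A)).
-- Strings are handled on the List Char side (PySem.Chars / Int.toChars), as PYSEM.md directs.
-- The pyGet?/ofChars? options are defaulted with .getD 0: for every i the loop visits
-- (100 <= i < 1000, three digit characters) they are `some`, so the default is never used.
def suxStep (acc : List Int) (i : Int) : List Int :=
  let A := PySem.Int.toChars i
  let dig : Int → Int := fun k =>
    ((PySem.Chars.pyGet? A k).bind (fun c => PySem.Int.ofChars? [c])).getD 0
  if dig 0 ^ 3 + dig 1 ^ 3 + dig 2 ^ 3 = (PySem.Int.ofChars? A).getD 0 then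
    acc ++ [(PySem.Int.ofChars? A).getD 0]
  else acc

def sux (n : Int) : String :=
  if n ≤ 100 then "none"
  else
    let L : List Int :=
      if n < 1000 then PySem.List.pyRange 100 (n + 1) 1
      else PySem.List.pyRange 100 1000 1
    let L1 := L.foldl suxStep []
    if L1 = [] then "none"
    else String.ofList (PySem.Chars.join ['\n'] (L1.map PySem.Int.toChars))

-- ===== PORT B =====
def armstrong3 : List Int := [153, 370, 371, 407]

def sux_alt (n : Int) : String :=
  if n ≤ 100 then "none"
  else
    let result := armstrong3.filter (fun x => x ≤ n)
    if result = [] then "none"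
    else String.ofList (PySem.Chars.join ['\n'] (result.map PySem.Int.toChars))

-- ===== PRECONDITION & SPEC =====
def Spec_sux (n : Int) (out : String) : Prop := out = sux_alt n
instance (n : Int) (out : String) : Decidable (Spec_sux n out) := by unfold Spec_sux; infer_instance

-- ===== CLAIM (what is proved, stated in full; the proofs are below) =====
def Claim_equal_sux : Prop := ∀ (n : Int), Dom_sux n → Spec_sux n (sux n)

-- ===== LEMMAS AND PROOFS =====

-- A's loop body appends i exactly when i is a three-digit Armstrong number: checked once for
-- each of the 900 values 100..999 by kernel evaluation.
def suxStepChk : Bool := (List.range 900).all fun m =>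
  suxStep [] (100 + (m : Int)) ==
    (if (100 + (m : Int)) ∈ armstrong3 then [100 + (m : Int)] else [])

set_option maxRecDepth 100000 in
theorem suxStepChk_true : suxStepChk = true := by rfl

theorem suxStep_nil_eq (m : Nat) (hm : m < 900) :
    suxStep [] (100 + (m : Int)) =
      (if (100 + (m : Int)) ∈ armstrong3 then [100 + (m : Int)] else []) := by
  have h := suxStepChk_true
  unfold suxStepChk at h
  rw [List.all_eq_true] at h
  exact eq_of_beq (h m (List.mem_range.mpr hm))

-- the loop body's test does not look at the accumulator
theorem suxStep_acc (acc : List Int) (i : Int) :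
    suxStep acc i = acc ++ suxStep [] i := by
  simp only [suxStep]
  split <;> simp

-- appending one more candidate to the filtered Armstrong list
theorem filter_succ (c : Int) (h : 100 ≤ c) :
    armstrong3.filter (fun x => x ≤ c + 1) =
      armstrong3.filter (fun x => x ≤ c) ++
        (if (c + 1) ∈ armstrong3 then [c + 1] else []) := by
  by_cases hc : c = 152 ∨ c = 369 ∨ c = 370 ∨ c = 406
  · rcases hc with rfl | rfl | rfl | rfl <;> decide
  · have hm : (c + 1) ∉ armstrong3 := by
      simp only [armstrong3, List.mem_cons, List.not_mem_nil, or_false]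
      omega
    rw [if_neg hm, List.append_nil]
    refine List.filter_congr ?_
    intro x hx
    simp only [armstrong3, List.mem_cons, List.not_mem_nil, or_false] at hx
    simp only [decide_eq_decide]
    rcases hx with rfl | rfl | rfl | rfl <;> omega

-- loop invariant: folding A's step over range(100, 101+k) yields the Armstrong numbers ≤ 100+k
theorem fold_range_eq : ∀ k : Nat, k < 900 →
    (PySem.List.pyRange 100 (101 + (k : Int)) 1).foldl suxStep [] =
      armstrong3.filter (fun x => x ≤ 100 + (k : Int)) := by
  intro k
  induction k with
  | zero =>
    intro _
    have h1 : (101 : Int) = 100 + 1 := by norm_num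
    simp only [Nat.cast_zero, add_zero, h1, PySem.List.pyRange_one_singleton]
    simpa using suxStep_nil_eq 0 (by norm_num)
  | succ k ih =>
    intro hk
    have e1 : (101 : Int) + ((k + 1 : Nat) : Int) = (101 + (k : Int)) + 1 := by push_cast; ring
    rw [e1, PySem.List.pyRange_one_succ_right (by omega), List.foldl_append,
      ih (by omega)]
    simp only [List.foldl_cons, List.foldl_nil]
    rw [suxStep_acc]
    have e2 : (101 : Int) + (k : Int) = 100 + ((k + 1 : Nat) : Int) := by push_cast; ring
    rw [e2, suxStep_nil_eq (k + 1) (by omega)]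
    have e3 : (100 : Int) + ((k + 1 : Nat) : Int) = (100 + (k : Int)) + 1 := by push_cast; ring
    rw [e3, filter_succ _ (by omega)]

-- for n ≥ 1000, every Armstrong number passes B's filter
theorem filter_all (n : Int) (h : 1000 ≤ n) :
    armstrong3.filter (fun x => x ≤ n) = armstrong3 := by
  simp only [armstrong3, List.filter_cons, List.filter_nil, decide_eq_true_eq]
  rw [if_pos (by omega), if_pos (by omega), if_pos (by omega), if_pos (by omega)]

-- ===== VERDICT (by name: the statement is the Claim_ definition above) =====
theorem sux_spec : Claim_equal_sux := by
  intro n _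
  unfold Spec_sux
  simp only [sux, sux_alt]
  by_cases h100 : n ≤ 100
  · rw [if_pos h100, if_pos h100]
  · rw [if_neg h100, if_neg h100]
    by_cases h1000 : n < 1000
    · rw [if_pos h1000]
      have hk : n + 1 = 101 + ((n - 100).toNat : Int) := by omega
      have hn : n = 100 + ((n - 100).toNat : Int) := by omega
      rw [hk, fold_range_eq (n - 100).toNat (by omega), ← hn]
    · rw [if_neg h1000]
      have h1 : (1000 : Int) = 101 + ((899 : Nat) : Int) := by norm_num
      rw [h1, fold_range_eq 899 (by norm_num), filter_all n (by omega)]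
      have h2 : armstrong3.filter (fun x => x ≤ 100 + ((899 : Nat) : Int)) = armstrong3 := by decide
      rw [h2]
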